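-- pv_equiv track=rewrite | github.com/Luen/Google-Scholar-References | references.py | hasCaptcha
-- ===== SOURCE A (Python) =====
-- def hasCaptcha(html):
--     captchas = [
--         "gs_captcha_ccl",  # the normal captcha div
--         "recaptcha",  # the form used on full-page captchas
--         "captcha-form",  # another form used on full-page captchas
--         "rc-doscaptcha-body",  # DOS
--     ]
--     for id in captchas:
--         if id in str(html):
--             return True
--     return False
-- ===== SOURCE B (Python) =====
-- import re
--
-- _CAPTCHA_RE = re.compile("gs_captcha_ccl|recaptcha|captcha-form|rc-doscaptcha-body")
--
--
-- def hasCaptcha(html):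
--     return _CAPTCHA_RE.search(str(html)) is not None
-- ===== Notes on version B (the rewrite author's own statement) =====
-- stated objective: idiomatic
-- what changed: B compiles the four markers into one regex alternation and makes a single re.search pass over str(html) instead of A's loop of four independent substring scans.
import Mathlib
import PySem

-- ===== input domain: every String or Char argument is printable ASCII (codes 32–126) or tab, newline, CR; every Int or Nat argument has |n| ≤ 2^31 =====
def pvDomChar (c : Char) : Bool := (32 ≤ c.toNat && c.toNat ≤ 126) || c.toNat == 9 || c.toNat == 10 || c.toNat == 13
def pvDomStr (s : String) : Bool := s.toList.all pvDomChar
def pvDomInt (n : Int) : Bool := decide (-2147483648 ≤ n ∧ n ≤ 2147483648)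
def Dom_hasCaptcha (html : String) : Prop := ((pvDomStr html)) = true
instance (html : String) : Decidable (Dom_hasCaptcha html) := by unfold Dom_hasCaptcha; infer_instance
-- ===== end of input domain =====

-- B replaces A's loop of four independent substring scans by one re.search pass with a regex alternation of the four literal markers (idiomatic, not claimed faster).
-- ===== PORT A =====
-- A: loop over the four marker strings, return True on the first 'id in str(html)' hit.
def hasCaptchaLoop (captchas : List String) (html : String) : Bool :=
  match captchas with
  | [] => false
  | id :: rest => if PySem.Str.isIn id html then true else hasCaptchaLoop rest html

def hasCaptcha (html : String) : Bool :=
  hasCaptchaLoop ["gs_captcha_ccl", "recaptcha", "captcha-form", "rc-doscaptcha-body"] html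

-- ===== PORT B =====
-- B: re.search of a regex alternation of literal strings. Ported exactly by its
-- semantics on this pattern: scan start positions 0..len left to right; at each
-- position try each alternative in pattern order as a prefix; a hit anywhere
-- means the search succeeds (exact for a pure alternation of literals).
def reSearchAltLoop (positions : List Int) (alternatives : List String) (cs : List Char) : Bool :=
  match positions with
  | [] => false
  | i :: rest =>
      if alternatives.any (fun m => decide (m.toList <+: cs.drop i.toNat)) then true
      else reSearchAltLoop rest alternatives cs

def hasCaptcha_alt (html : String) : Bool :=
  let text := html
  let alternatives := ["gs_captcha_ccl", "recaptcha", "captcha-form", "rc-doscaptcha-body"]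
  reSearchAltLoop (PySem.List.pyRange 0 ((PySem.Str.len text) + 1) 1) alternatives text.toList

-- ===== PRECONDITION & SPEC =====
def Spec_hasCaptcha (html : String) (out : Bool) : Prop := out = hasCaptcha_alt html
instance (html : String) (out : Bool) : Decidable (Spec_hasCaptcha html out) := by unfold Spec_hasCaptcha; infer_instance

-- ===== CLAIM (what is proved, stated in full; the proofs are below) =====
def Claim_equal_hasCaptcha : Prop := ∀ (html : String), Dom_hasCaptcha html → Spec_hasCaptcha html (hasCaptcha html)

-- ===== LEMMAS AND PROOFS =====

theorem hasCaptchaLoop_any (captchas : List String) (html : String) :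
    hasCaptchaLoop captchas html = captchas.any (fun id => PySem.Str.isIn id html) := by
  induction captchas with
  | nil => rfl
  | cons id rest ih =>
      cases h : PySem.Chars.isIn id.toList html.toList <;>
        simp [hasCaptchaLoop, h, ih]

theorem reSearchAltLoop_any (positions : List Int) (alternatives : List String) (cs : List Char) :
    reSearchAltLoop positions alternatives cs
      = positions.any (fun i => alternatives.any (fun m => decide (m.toList <+: cs.drop i.toNat))) := by
  induction positions with
  | nil => rfl
  | cons i rest ih =>
      simp only [reSearchAltLoop, List.any_cons]
      split_ifs with h <;> simp [h, ih]

theorem marker_swap (alternatives : List String) (cs : List Char) :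
    ((PySem.List.pyRange 0 ((cs.length : Int) + 1) 1).any
        (fun i => alternatives.any (fun m => decide (m.toList <+: cs.drop i.toNat))))
      = alternatives.any (fun m => PySem.Chars.isIn m.toList cs) := by
  rw [Bool.eq_iff_iff]
  simp only [List.any_eq_true]
  constructor
  · rintro ⟨i, _, m, hm, hp⟩
    exact ⟨m, hm, (PySem.Chars.exists_prefix_drop_iff_isIn _ _).mp ⟨i.toNat, of_decide_eq_true hp⟩⟩
  · rintro ⟨m, hm, hin⟩
    obtain ⟨j, hj⟩ := (PySem.Chars.exists_prefix_drop_iff_isIn _ _).mpr hin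
    by_cases hle : j ≤ cs.length
    · refine ⟨(j : Int), ?_, m, hm, ?_⟩
      · rw [PySem.List.mem_pyRange_one]; omega
      · simpa using hj
    · -- j past the end: drop j = [], so m = [] and position 0 works too
      have hnil : cs.drop j = [] := List.drop_eq_nil_of_le (by omega)
      have hm0 : m.toList = [] := by
        have := List.IsPrefix.sublist hj
        rw [hnil] at this
        exact List.sublist_nil.mp this
      refine ⟨0, ?_, m, hm, ?_⟩
      · rw [PySem.List.mem_pyRange_one]; omega
      · simp [hm0]

-- ===== VERDICT (by name: the statement is the Claim_ definition above) =====
theorem hasCaptcha_spec : Claim_equal_hasCaptcha := by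
  intro html _
  show hasCaptcha html = hasCaptcha_alt html
  rw [hasCaptcha, hasCaptcha_alt]
  simp only [hasCaptchaLoop_any, reSearchAltLoop_any]
  have h := marker_swap ["gs_captcha_ccl", "recaptcha", "captcha-form", "rc-doscaptcha-body"] html.toList
  simpa using h.symm
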